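-- pv_equiv track=rewrite | github.com/NotoriousBIF/BScMSLearning | main.py | massSorter
-- ===== SOURCE A (Python) =====
-- def massSorter(x,y):
--     """Takes a dictionary containing aliases as its x-argument and a list containing spectral metadata as its y-arg.
--     sorts every list entry based on the instrument-type and returns a dictionary with the key being instrument-type
--     category and the values are the associated parent mass."""
--     outputdict = {}
--     for kv in x:
--         outputlst = []
--         aliasList = x.get(kv)
--         for tup in y:
--             if tup[0] in aliasList:
--                 outputlst.append(tup[1])
--             else:
--                 pass
--         outputdict[kv] = outputlst
--     return outputdict
-- ===== SOURCE B (Python) =====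
-- def massSorter(x, y):
--     inv = {}
--     outputdict = {}
--     for kv, aliases in x.items():
--         outputdict[kv] = []
--         for a in dict.fromkeys(aliases):
--             inv[a] = inv.get(a, []) + [kv]
--     for a, m in y:
--         for kv in inv.get(a, []):
--             outputdict[kv].append(m)
--     return outputdict
-- ===== Notes on version B (the rewrite author's own statement) =====
-- stated objective: faster
-- what changed: Instead of scanning all of y once per key with a linear alias-list membership test, B inverts the aliases into a dict alias->keys and makes a single pass over y appending each mass to its keys' buckets.
import Mathlib
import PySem

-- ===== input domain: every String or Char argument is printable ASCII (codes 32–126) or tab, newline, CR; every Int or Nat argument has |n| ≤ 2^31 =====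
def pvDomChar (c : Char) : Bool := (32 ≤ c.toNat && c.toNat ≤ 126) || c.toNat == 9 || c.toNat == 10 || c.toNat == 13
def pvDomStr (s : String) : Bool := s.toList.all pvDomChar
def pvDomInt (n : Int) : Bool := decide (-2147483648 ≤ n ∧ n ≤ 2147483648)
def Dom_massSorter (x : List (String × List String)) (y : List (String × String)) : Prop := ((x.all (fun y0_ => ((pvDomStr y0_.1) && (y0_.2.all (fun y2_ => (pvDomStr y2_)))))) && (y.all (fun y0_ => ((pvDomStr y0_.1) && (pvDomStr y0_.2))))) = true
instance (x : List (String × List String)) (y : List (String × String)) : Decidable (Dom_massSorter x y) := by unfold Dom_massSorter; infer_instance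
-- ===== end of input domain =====

-- B replaces A's nested scan of y for every key by an inverted alias→keys index built once,
-- so y is traversed a single time (objective: faster, asymptotically).

-- ===== PORT A =====
-- x arrives as a dict: PySem.Dict.ofList x. 'for kv in x' with 'aliasList = x.get(kv)'
-- visits each key with its value, i.e. the items of the dict.
def massSorter (x : List (String × List String)) (y : List (String × String)) : List (String × List String) :=
  let xd := PySem.Dict.ofList x
  let outputdict := xd.items.foldl (fun outputdict kv =>
    let aliasList := kv.2
    let outputlst := y.foldl (fun outputlst tup =>
      if tup.1 ∈ aliasList then outputlst ++ [tup.2] else outputlst) []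
    outputdict.insert kv.1 outputlst) (PySem.Dict.empty)
  outputdict.items

-- ===== PORT B =====
-- one loop over x building (outputdict with empty lists, inverted index alias→keys),
-- then ONE pass over y appending each mass to the buckets of the keys its alias maps to.
-- dict.fromkeys(aliases) = PySem.List.dedup; inv[a] = inv.get(a,[]) + [kv] = modify;
-- outputdict[kv].append(m) = modify (kv is always a key of outputdict).
def massSorter_alt (x : List (String × List String)) (y : List (String × String)) : List (String × List String) :=
  let xd := PySem.Dict.ofList x
  let st := xd.items.foldl (fun st p =>
      (st.1.insert p.1 ([] : List String),
       (PySem.List.dedup p.2).foldl (fun inv a => inv.modify a [] (· ++ [p.1])) st.2))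
    (PySem.Dict.empty, PySem.Dict.empty)
  let inv := st.2
  let out := y.foldl (fun od t =>
      (inv.getD t.1 []).foldl (fun od kv => od.modify kv [] (· ++ [t.2])) od) st.1
  out.items

-- ===== PRECONDITION & SPEC =====
def Spec_massSorter (x : List (String × List String)) (y : List (String × String)) (out : List (String × List String)) : Prop := out = massSorter_alt x y
instance (x : List (String × List String)) (y : List (String × String)) (out : List (String × List String)) : Decidable (Spec_massSorter x y out) := by unfold Spec_massSorter; infer_instance

-- ===== CLAIM (what is proved, stated in full; the proofs are below) =====
def Claim_equal_massSorter : Prop := ∀ (x : List (String × List String)) (y : List (String × String)), Dom_massSorter x y → Spec_massSorter x y (massSorter x y)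

-- ===== LEMMAS AND PROOFS =====

-- a map-with-constant-second-component, filtered on the first: picks the single hit of a Nodup key list
lemma pv_filter_map_const {γ : Type} (ks : List String) (h : ks.Nodup) (v : γ) (c : String) :
    (((ks.map (fun a => (a, v))).filter (fun q => q.1 == c)).map (fun q => q.2))
      = if c ∈ ks then [v] else [] := by
  induction ks with
  | nil => simp
  | cons b bs ih =>
    simp only [List.nodup_cons] at h
    simp only [List.map_cons, List.filter_cons, List.mem_cons]
    by_cases hb : b = c
    · subst hb
      have hrest : (bs.map (fun a => (a, v))).filter (fun q => q.1 == b) = [] := by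
        rw [List.filter_eq_nil_iff]
        rintro q hq
        simp only [List.mem_map] at hq
        obtain ⟨a, ha, rfl⟩ := hq
        simp only [beq_iff_eq]
        rintro rfl; exact h.1 ha
      simp [hrest]
    · have hcb : ¬(c = b) := fun hc => hb hc.symm
      rw [if_neg (by simp [hb]), ih h.2]
      simp [hcb]

-- flattened (key, value) stream filtered on one key: the values of exactly the entries hitting c
lemma pv_flat_filter {γ : Type} (zs : List γ) (ks : γ → List String) (v : γ → String)
    (h : ∀ z ∈ zs, (ks z).Nodup) (c : String) :
    (((zs.flatMap (fun z => (ks z).map (fun a => (a, v z)))).filter (fun q => q.1 == c)).map (fun q => q.2))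
      = (zs.filter (fun z => c ∈ ks z)).map v := by
  induction zs with
  | nil => simp
  | cons z zs ih =>
    simp only [List.flatMap_cons, List.filter_append, List.map_append, List.filter_cons]
    rw [pv_filter_map_const (ks z) (h z (List.mem_cons_self)) (v z) c,
        ih (fun z hz => h z (List.mem_cons_of_mem _ hz))]
    by_cases hc : c ∈ ks z <;> simp [hc]

theorem massSorter_spec : Claim_equal_massSorter := by
  intro x y _
  unfold Spec_massSorter massSorter massSorter_alt
  dsimp only
  set xd := PySem.Dict.ofList x with hxd
  set L := xd.items with hL
  have hkeys : xd.keys.Nodup := PySem.Dict.nodup_keys_ofList x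
  have hkeysL : xd.keys = L.map (fun p => p.1) := rfl
  have hLnodup : (L.map (fun p => p.1)).Nodup := by rw [← hkeysL]; exact hkeys
  -- A's side: the outer loop inserts fresh distinct keys
  have hA : (L.foldl (fun outputdict kv =>
        outputdict.insert kv.1 (y.foldl (fun outputlst tup =>
          if tup.1 ∈ kv.2 then outputlst ++ [tup.2] else outputlst) []))
        (PySem.Dict.empty : PySem.Dict String (List String))).items
      = L.map (fun p => (p.1, y.foldl (fun outputlst tup =>
          if tup.1 ∈ p.2 then outputlst ++ [tup.2] else outputlst) [])) := by
    rw [PySem.Dict.items_foldl_insert_fresh L (fun p => p.1) _ _ (by simp) hLnodup]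
    simp [PySem.Dict.empty]
  -- B's side: split the paired fold
  have hsplit : L.foldl (fun st (p : String × List String) =>
        (st.1.insert p.1 ([] : List String),
         (PySem.List.dedup p.2).foldl (fun inv a => inv.modify a [] (· ++ [p.1])) st.2))
      ((PySem.Dict.empty : PySem.Dict String (List String)),
       (PySem.Dict.empty : PySem.Dict String (List String)))
      = (L.foldl (fun od (p : String × List String) => od.insert p.1 ([] : List String)) PySem.Dict.empty,
         L.foldl (fun inv (p : String × List String) =>
           (PySem.List.dedup p.2).foldl (fun inv a => inv.modify a [] (· ++ [p.1])) inv) PySem.Dict.empty) :=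
    PySem.List.foldl_prod_mk
      (fun od (p : String × List String) => od.insert p.1 ([] : List String))
      (fun inv (p : String × List String) =>
        (PySem.List.dedup p.2).foldl (fun inv a => inv.modify a [] (· ++ [p.1])) inv)
      L PySem.Dict.empty PySem.Dict.empty
  rw [hA, hsplit]
  set inv := L.foldl (fun inv (p : String × List String) =>
      (PySem.List.dedup p.2).foldl (fun inv a => inv.modify a [] (· ++ [p.1])) inv)
      (PySem.Dict.empty : PySem.Dict String (List String)) with hinv
  set od0 := L.foldl (fun od (p : String × List String) => od.insert p.1 ([] : List String))
      (PySem.Dict.empty : PySem.Dict String (List String)) with hod0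
  -- od0: same keys as xd, every bucket empty
  have hod0items : od0.items = L.map (fun p => (p.1, ([] : List String))) := by
    rw [hod0, PySem.Dict.items_foldl_insert_fresh L (fun p => p.1) _ _ (by simp) hLnodup]
    simp [PySem.Dict.empty]
  have hod0keys : od0.keys = L.map (fun p => p.1) := by
    show od0.items.map (fun p => p.1) = _
    rw [hod0items]; simp
  have hod0nodup : od0.keys.Nodup := by rw [hod0keys]; exact hLnodup
  -- the inverted index: inv[a] lists, in x-order, the keys whose alias list contains a
  have hinvget : ∀ a : String, inv.getD a [] = (L.filter (fun p => a ∈ p.2)).map (fun p => p.1) := by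
    intro a
    rw [hinv]
    have hflat : L.foldl (fun inv (p : String × List String) =>
        (PySem.List.dedup p.2).foldl (fun inv a => inv.modify a [] (· ++ [p.1])) inv)
        (PySem.Dict.empty : PySem.Dict String (List String))
      = (L.flatMap (fun p => (PySem.List.dedup p.2).map (fun a => (a, p.1)))).foldl
          (fun d q => d.modify q.1 [] (· ++ [q.2])) PySem.Dict.empty := by
      rw [List.foldl_flatMap]
      simp only [List.foldl_map]
    rw [hflat, PySem.Dict.getD_foldl_modify_append, PySem.Dict.getD_empty]
    rw [pv_flat_filter L (fun p => PySem.List.dedup p.2) (fun p => p.1)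
        (fun z _ => PySem.List.nodup_dedup z.2) a]
    rw [List.nil_append]
    congr 1
    exact List.filter_congr (fun p _ => by simp)
  have hinvnodup : ∀ a : String, (inv.getD a []).Nodup := by
    intro a
    rw [hinvget a]
    exact hLnodup.sublist (List.Sublist.map _ List.filter_sublist)
  have hinvmem : ∀ a k, k ∈ inv.getD a [] ↔ ∃ p ∈ L, p.1 = k ∧ a ∈ p.2 := by
    intro a k
    rw [hinvget a]
    simp only [List.mem_map, List.mem_filter]
    constructor
    · rintro ⟨p, ⟨hp, hm⟩, rfl⟩; exact ⟨p, hp, rfl, by simpa using hm⟩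
    · rintro ⟨p, hp, rfl, hm⟩; exact ⟨p, ⟨hp, by simpa using hm⟩, rfl⟩
  -- the single pass over y, flattened
  have hyflat : y.foldl (fun od t =>
        (inv.getD t.1 []).foldl (fun od kv => od.modify kv [] (· ++ [t.2])) od) od0
      = (y.flatMap (fun t => (inv.getD t.1 []).map (fun kv => (kv, t.2)))).foldl
          (fun d q => d.modify q.1 [] (· ++ [q.2])) od0 := by
    rw [List.foldl_flatMap]
    simp [List.foldl_map]
  rw [hyflat]
  set flat := y.flatMap (fun t => (inv.getD t.1 []).map (fun kv => (kv, t.2))) with hflat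
  set out := flat.foldl (fun d q => d.modify q.1 [] (· ++ [q.2])) od0 with hout
  -- every key touched by the pass is already a key of od0, so keys are unchanged
  have hflatkeys : ∀ z ∈ flat.map (fun q => q.1), z ∈ od0.keys := by
    intro z hz
    rw [hflat] at hz
    simp only [List.map_flatMap, List.mem_flatMap, List.map_map, List.mem_map,
      Function.comp] at hz
    obtain ⟨t, ht, k, hk, hzk⟩ := hz
    obtain ⟨p, hp, rfl, _⟩ := (hinvmem t.1 k).1 hk
    rw [hod0keys]
    exact (hzk ▸ List.mem_map_of_mem hp : z ∈ L.map (fun p => p.1))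
  have houtkeys : out.keys = od0.keys := by
    rw [hout, PySem.Dict.keys_foldl_modify_key flat (fun q => q.1) [] (fun _ q v => v ++ [q.2]) od0,
        PySem.Set.update_eq_append_filter]
    have : ((PySem.Set.ofList (flat.map (fun q => q.1))).filter
        (fun z => !(PySem.Set.contains od0.keys z))) = [] := by
      rw [List.filter_eq_nil_iff]
      intro z hz
      have hzm : z ∈ flat.map (fun q => q.1) := (PySem.Set.mem_ofList _ _).1 hz
      have hzk : z ∈ od0.keys := hflatkeys z hzm
      simpa using hzk
    rw [this, List.append_nil]
  have houtnodup : out.keys.Nodup := by rw [houtkeys]; exact hod0nodup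
  rw [PySem.Dict.items_eq_map_keys out houtnodup [], houtkeys, hod0keys, List.map_map]
  -- pointwise: each bucket of out equals A's filter over y
  apply List.map_congr_left
  intro p hp
  simp only [Function.comp]
  have hget : out.getD p.1 [] = od0.getD p.1 [] ++ ((flat.filter (fun q => q.1 == p.1)).map (fun q => q.2)) :=
    PySem.Dict.getD_foldl_modify_append flat od0 p.1
  have hod0get : od0.getD p.1 [] = [] := by
    have hmem : (p.1, ([] : List String)) ∈ od0.items := by
      rw [hod0items]; exact List.mem_map_of_mem hp
    exact PySem.Dict.getD_of_mem_items _ hmem hod0nodup []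
  have hflatfilter : (flat.filter (fun q => q.1 == p.1)).map (fun q => q.2)
      = (y.filter (fun t => p.1 ∈ inv.getD t.1 [])).map (fun t => t.2) := by
    rw [hflat]
    exact pv_flat_filter y (fun t => inv.getD t.1 []) (fun t => t.2)
      (fun t _ => hinvnodup t.1) p.1
  have hcond : ∀ t : String × String, (p.1 ∈ inv.getD t.1 []) ↔ (t.1 ∈ p.2) := by
    intro t
    rw [hinvmem t.1 p.1]
    constructor
    · rintro ⟨q, hq, hq1, hm⟩
      have : q = p := List.inj_on_of_nodup_map hLnodup hq hp hq1
      exact this ▸ hm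
    · intro hm; exact ⟨p, hp, rfl, hm⟩
  have hloop := PySem.List.foldl_append_if (fun t : String × String => decide (t.1 ∈ p.2)) (fun t => t.2) y []
  simp only [decide_eq_true_eq] at hloop
  have hfc : (y.filter (fun t => decide (t.1 ∈ p.2))) = y.filter (fun t => decide (p.1 ∈ inv.getD t.1 [])) :=
    List.filter_congr (fun t _ => by simp [hcond t])
  rw [hget, hod0get, hflatfilter, List.nil_append, hloop, List.nil_append, hfc]
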